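-- pv_equiv track=rewrite | github.com/radhikapaliwal97/Trakm8 | task_2.py | reverse_and_replace
-- ===== SOURCE A (Python) =====
-- def reverse_and_replace_word(words):
--     match_count = 1
--     # Add a space at the end to handle the last word
--     words = words + " "
--     my_string = words[0]
--     for wrd in range(1, len(words)):
--         # Check if the current character matches the previous one
--         if words[wrd-1] == words[wrd]:
--             # Increment the match count if it's a consecutive match
--             match_count += 1
--         else:
--             if match_count > 1:
--                 # Replace matched character with '*'
--                 my_string = my_string[:-1]+"*"*match_count
--             # Reset match count for the new character
--             match_count = 1
--             # Return the result string without the extra space at the end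
--             my_string += words[wrd]
--
--     return my_string[:-1]
--
-- def reverse_and_replace(arr):
--     reverse_list = []
--     for string in arr:
--         rev_list = []
--         words = string.split()[::-1]
--         for strs in words:
--             # Reverse and replace each word
--             rev_list.append(reverse_and_replace_word(strs))
--         # Join the reversed and replaced words and append to the result list
--         reverse_list.append(" ".join(rev_list))
--     return reverse_list
-- ===== SOURCE B (Python) =====
-- def _replace_runs(w):
--     # Collapse each maximal run of a repeated character into that many '*';
--     # single characters are kept as-is.
--     parts = []
--     i = 0
--     n = len(w)
--     while i < n:
--         j = i
--         while j < n and w[j] == w[i]: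
--             j += 1
--         k = j - i
--         parts.append(w[i] if k == 1 else "*" * k)
--         i = j
--     return "".join(parts)
--
-- def reverse_and_replace(arr):
--     return [" ".join(_replace_runs(w) for w in s.split()[::-1]) for s in arr]
-- ===== Notes on version B (the rewrite author's own statement) =====
-- stated objective: simpler
-- what changed: A scans each word by index with a match_count accumulator, an appended sentinel space and repeated my_string[:-1] surgery on the accumulated output; B decomposes each word into maximal runs (two-pointer run extraction) and emits each run directly, with the whole function as two comprehensions.
import Mathlib
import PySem

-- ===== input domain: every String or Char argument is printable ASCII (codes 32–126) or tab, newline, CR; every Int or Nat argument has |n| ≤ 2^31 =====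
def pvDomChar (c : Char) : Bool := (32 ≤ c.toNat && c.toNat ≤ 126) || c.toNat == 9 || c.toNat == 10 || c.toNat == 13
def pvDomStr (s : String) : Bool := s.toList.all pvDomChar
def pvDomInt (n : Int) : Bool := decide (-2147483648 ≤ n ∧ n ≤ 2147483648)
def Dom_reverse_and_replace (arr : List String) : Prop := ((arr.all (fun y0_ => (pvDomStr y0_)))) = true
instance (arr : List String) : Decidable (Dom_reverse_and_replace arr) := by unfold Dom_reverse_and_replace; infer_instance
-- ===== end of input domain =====

-- B replaces A's index-based scanner with its match_count accumulator, sentinel space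
-- and my_string[:-1] surgery by a per-word run decomposition (extract each maximal run,
-- emit it, recurse on the rest) and list comprehensions; objective: simpler. Same values.

-- ===== PORT A =====

-- the loop body of reverse_and_replace_word (state = (match_count, my_string))
def rarStep (ws : List Char) (st : Nat × List Char) (wrd : Int) : Nat × List Char :=
  let match_count := st.1
  let my_string := st.2
  -- if words[wrd-1] == words[wrd]
  if PySem.List.pyGetD ws (wrd - 1) ' ' == PySem.List.pyGetD ws wrd ' ' then
    (match_count + 1, my_string)
  else
    let my_string :=
      if match_count > 1 then
        -- my_string[:-1] + "*"*match_count
        PySem.List.slice my_string none (some (-1)) ++ List.replicate match_count '*'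
      else my_string
    (1, my_string ++ [PySem.List.pyGetD ws wrd ' '])

def reverse_and_replace_word (words : String) : String :=
  -- words = words + " "
  let ws : List Char := words.toList ++ [' ']
  -- my_string = words[0]  (in range: ws ends with the appended ' ', so it is nonempty)
  let my0 : List Char := [(PySem.List.pyGet? ws 0).getD ' ']
  -- for wrd in range(1, len(words)): ...
  let st := (PySem.List.pyRange 1 (ws.length : Int) 1).foldl (rarStep ws) (1, my0)
  -- return my_string[:-1]
  String.ofList (PySem.List.slice st.2 none (some (-1)))

-- the body of A's outer loop
def rarString (string : String) : String :=
  -- words = string.split()[::-1]   (step -1 ≠ 0, so slice? is some)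
  let words := (PySem.List.slice? (PySem.Str.split₀ string) none none (-1)).getD []
  -- for strs in words: rev_list.append(reverse_and_replace_word(strs))
  let rev_list := words.foldl (fun rl strs => rl ++ [reverse_and_replace_word strs]) []
  -- " ".join(rev_list)
  PySem.Str.join " " rev_list

def reverse_and_replace (arr : List String) : List String :=
  arr.foldl (fun reverse_list string => reverse_list ++ [rarString string]) []

-- ===== PORT B =====

-- _replace_runs: the outer while-loop over maximal runs; the inner 'while w[j] == w[i]'
-- is the takeWhile count, 'i = j' the drop.
def replaceRuns : List Char → List Char
  | [] => []
  | c :: rest =>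
    let k := (rest.takeWhile (· == c)).length + 1
    (if k == 1 then [c] else List.replicate k '*') ++ replaceRuns (rest.drop (k - 1))
termination_by l => l.length
decreasing_by simp only [List.length_drop, List.length_cons]; omega

def reverse_and_replace_alt (arr : List String) : List String :=
  arr.map (fun s =>
    PySem.Str.join " "
      (((PySem.Str.split₀ s).reverse).map (fun w => String.ofList (replaceRuns w.toList))))

-- ===== PRECONDITION & SPEC =====
def Spec_reverse_and_replace (arr : List String) (out : List String) : Prop := out = reverse_and_replace_alt arr
instance (arr : List String) (out : List String) : Decidable (Spec_reverse_and_replace arr out) := by unfold Spec_reverse_and_replace; infer_instance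

-- ===== CLAIM (what is proved, stated in full; the proofs are below) =====
def Claim_equal_reverse_and_replace : Prop := ∀ (arr : List String), Dom_reverse_and_replace arr → Spec_reverse_and_replace arr (reverse_and_replace arr)

-- ===== LEMMAS AND PROOFS =====

-- A's scanner, rephrased as a recursion on the still-unscanned characters:
-- prev = words[wrd-1], mc = match_count, my = my_string.
def procA (prev : Char) (mc : Nat) (my : List Char) : List Char → List Char
  | [] => my
  | d :: ds =>
    if prev == d then procA d (mc + 1) my ds
    else procA d 1 ((if mc > 1 then my.dropLast ++ List.replicate mc '*' else my) ++ [d]) ds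

-- every token of str.split() is nonempty and whitespace-free
theorem split₀_go_sound (s : List Char) : ∀ (cur : List Char) (acc : List (List Char)),
    (∀ c ∈ cur, PySem.Chars.isspace c = false) →
    (∀ t ∈ acc, t ≠ [] ∧ ∀ c ∈ t, PySem.Chars.isspace c = false) →
    ∀ t ∈ PySem.Chars.split₀.go s cur acc, t ≠ [] ∧ ∀ c ∈ t, PySem.Chars.isspace c = false := by
  induction s with
  | nil =>
    intro cur acc hcur hacc t ht
    unfold PySem.Chars.split₀.go at ht
    split_ifs at ht with h
    · exact hacc t (List.mem_reverse.mp ht)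
    · rcases List.mem_cons.mp (List.mem_reverse.mp ht) with ht | ht
      · subst ht
        refine ⟨fun hcontra => h ?_, fun c hc => hcur c (List.mem_reverse.mp hc)⟩
        simpa [List.isEmpty_iff] using congrArg List.reverse hcontra
      · exact hacc t ht
  | cons c rest ih =>
    intro cur acc hcur hacc t ht
    unfold PySem.Chars.split₀.go at ht
    split_ifs at ht with h1 h2
    · exact ih [] acc (by simp) hacc t ht
    · refine ih [] (cur.reverse :: acc) (by simp) ?_ t ht
      intro t' ht'
      rcases List.mem_cons.mp ht' with ht' | ht'
      · subst ht'
        refine ⟨fun hcontra => h2 ?_, fun c hc => hcur c (List.mem_reverse.mp hc)⟩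
        simpa [List.isEmpty_iff] using congrArg List.reverse hcontra
      · exact hacc t' ht'
    · refine ih (c :: cur) acc ?_ hacc t ht
      intro c' hc'
      rcases List.mem_cons.mp hc' with hc' | hc'
      · subst hc'; simpa using h1
      · exact hcur c' hc'

theorem split₀_sound (s : String) : ∀ w ∈ PySem.Str.split₀ s,
    w.toList ≠ [] ∧ ∀ c ∈ w.toList, c ≠ ' ' := by
  intro w hw
  have : ∃ t ∈ PySem.Chars.split₀ s.toList, String.ofList t = w := by
    simpa [PySem.Str.split₀] using hw
  rcases this with ⟨t, ht, rfl⟩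
  have hs := split₀_go_sound s.toList [] [] (by simp) (by simp) t ht
  rw [String.toList_ofList]
  refine ⟨hs.1, fun c hc hsp => ?_⟩
  have := hs.2 c hc
  rw [hsp] at this
  exact absurd this (by decide)

theorem foldA (u : List Char) : ∀ (pre : List Char) (c : Char) (mc : Nat) (my : List Char),
    ((PySem.List.pyRange ((pre.length : Int) + 1) ((pre.length : Int) + 1 + u.length) 1).foldl
        (rarStep (pre ++ c :: u)) (mc, my)).2
      = procA c mc my u := by
  induction u with
  | nil =>
    intro pre c mc my
    simp [PySem.List.pyRange, procA]
  | cons d ds ih =>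
    intro pre c mc my
    have hlt : (pre.length : Int) + 1 < (pre.length : Int) + 1 + ((d :: ds).length : Int) := by
      simp only [List.length_cons]
      push_cast
      omega
    rw [PySem.List.pyRange_one_cons hlt, List.foldl_cons]
    have hcur : PySem.List.pyGetD (pre ++ c :: d :: ds) ((pre.length : Int) + 1) ' ' = d := by
      rw [show (pre.length : Int) + 1 = ((pre.length + 1 : Nat) : Int) by push_cast; ring,
        PySem.List.pyGetD_natCast]
      rw [show pre ++ c :: d :: ds = (pre ++ [c]) ++ d :: ds by simp,
        show pre.length + 1 = (pre ++ [c]).length by simp]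
      simp [List.getD_eq_getElem?_getD]
    have hshape : pre ++ c :: d :: ds = (pre ++ [c]) ++ d :: ds := by simp
    have hib := ih (pre ++ [c]) d
    rw [show ((pre ++ [c]).length : Int) + 1 = (pre.length : Int) + 1 + 1 by simp] at hib
    by_cases h : (c == d) = true
    · rw [show rarStep (pre ++ c :: d :: ds) (mc, my) ((pre.length : Int) + 1) = (mc + 1, my) by
        simp [rarStep, hcur, h]]
      rw [hshape]
      rw [show (pre.length : Int) + 1 + ((d :: ds).length : Int)
            = (pre.length : Int) + 1 + 1 + (ds.length : Int) by push_cast [List.length_cons]; ring]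
      rw [hib]
      have hcd : c = d := eq_of_beq h
      simp [procA, hcd]
    · rw [show rarStep (pre ++ c :: d :: ds) (mc, my) ((pre.length : Int) + 1)
            = (1, (if mc > 1 then my.dropLast ++ List.replicate mc '*' else my) ++ [d]) by
        simp [rarStep, hcur, h, PySem.List.slice_to_neg_one]]
      rw [hshape]
      rw [show (pre.length : Int) + 1 + ((d :: ds).length : Int)
            = (pre.length : Int) + 1 + 1 + (ds.length : Int) by push_cast [List.length_cons]; ring]
      rw [hib]
      simp [procA, h]

-- closing a run: A's "[:-1] + '*'*mc" surgery on acc ++ [c] is exactly B's run emission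
theorem emit_close (acc : List Char) (c : Char) (mc : Nat) (h : 1 ≤ mc) :
    (if mc > 1 then (acc ++ [c]).dropLast ++ List.replicate mc '*' else acc ++ [c])
      = acc ++ (if mc == 1 then [c] else List.replicate mc '*') := by
  by_cases h1 : mc = 1
  · simp [h1]
  · have h2 : mc > 1 := by omega
    simp [h2, h1]

theorem procA_eq (u : List Char) : ∀ (c : Char), c ≠ ' ' → (∀ x ∈ u, x ≠ ' ') →
    ∀ (mc : Nat), 1 ≤ mc → ∀ (acc : List Char),
    procA c mc (acc ++ [c]) (u ++ [' ']) =
      acc ++ ((if mc + (u.takeWhile (· == c)).length == 1 then [c]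
               else List.replicate (mc + (u.takeWhile (· == c)).length) '*')
              ++ replaceRuns (u.drop ((u.takeWhile (· == c)).length))) ++ [' '] := by
  induction u with
  | nil =>
    intro c hc hu mc hmc acc
    have hcs : (c == ' ') = false := beq_eq_false_iff_ne.mpr hc
    simp only [List.nil_append, procA, hcs, Bool.false_eq_true, if_false,
      List.takeWhile_nil, List.length_nil, List.drop_nil, replaceRuns, List.append_nil,
      Nat.add_zero]
    rw [emit_close acc c mc hmc]
  | cons d ds ih =>
    intro c hc hu mc hmc acc
    have hd : d ≠ ' ' := hu d (by simp)
    have hds : ∀ x ∈ ds, x ≠ ' ' := fun x hx => hu x (by simp [hx])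
    by_cases h : (c == d) = true
    · have hcd : c = d := eq_of_beq h
      subst hcd
      have hstep : procA c mc (acc ++ [c]) ((c :: ds) ++ [' '])
          = procA c (mc + 1) (acc ++ [c]) (ds ++ [' ']) := by
        simp [procA]
      rw [hstep, ih c hc hds (mc + 1) (by omega) acc]
      have htw : (c :: ds).takeWhile (· == c) = c :: ds.takeWhile (· == c) := by simp
      rw [htw]
      simp only [List.length_cons, List.drop_succ_cons]
      rw [show mc + ((ds.takeWhile (· == c)).length + 1)
            = mc + 1 + (ds.takeWhile (· == c)).length by omega]
    · have hdc : (d == c) = false := beq_eq_false_iff_ne.mpr (fun he => h (by simp [he]))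
      have hstep : procA c mc (acc ++ [c]) ((d :: ds) ++ [' '])
          = procA d 1 ((if mc > 1 then (acc ++ [c]).dropLast ++ List.replicate mc '*'
                         else acc ++ [c]) ++ [d]) (ds ++ [' ']) := by
        simp [procA, h]
      rw [hstep, emit_close acc c mc hmc,
        ih d hd hds 1 le_rfl (acc ++ if mc == 1 then [c] else List.replicate mc '*')]
      have htw : (d :: ds).takeWhile (· == c) = [] := by simp [hdc]
      rw [htw]
      simp only [List.length_nil, Nat.add_zero, List.drop_zero]
      have hrr : replaceRuns (d :: ds)
          = (if (ds.takeWhile (· == d)).length + 1 == 1 then [d]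
             else List.replicate ((ds.takeWhile (· == d)).length + 1) '*')
            ++ replaceRuns (ds.drop (ds.takeWhile (· == d)).length) := by
      -- unfold one step of replaceRuns
        rw [replaceRuns]
        simp
      rw [hrr, show 1 + (ds.takeWhile (· == d)).length
            = (ds.takeWhile (· == d)).length + 1 by omega]
      simp

theorem word_eq (w : String) (hne : w.toList ≠ []) (hns : ∀ x ∈ w.toList, x ≠ ' ') :
    reverse_and_replace_word w = String.ofList (replaceRuns w.toList) := by
  obtain ⟨c, u, ht⟩ : ∃ c u, w.toList = c :: u := by
    cases hw : w.toList with
    | nil => exact absurd hw hne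
    | cons c u => exact ⟨c, u, rfl⟩
  have hc : c ≠ ' ' := hns c (by rw [ht]; simp)
  have hu : ∀ x ∈ u, x ≠ ' ' := fun x hx => hns x (by rw [ht]; simp [hx])
  have key := foldA (u ++ [' ']) [] c 1 [c]
  rw [show ((([] : List Char).length : Int) + 1) = 1 by simp] at key
  rw [show (1 : Int) + (((u ++ [' ']).length : Nat) : Int) = (((c :: (u ++ [' '])).length : Nat) : Int) by
    push_cast [List.length_cons]; ring] at key
  simp only [List.nil_append] at key
  have pk := procA_eq u c hc hu 1 le_rfl []
  simp only [List.nil_append] at pk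
  unfold reverse_and_replace_word
  rw [ht]
  simp only [List.cons_append]
  have h0 : (PySem.List.pyGet? (c :: (u ++ [' '])) 0).getD ' ' = c := by
    have hpos : (0 : Int) ≤ (u.length : Int) + 1 := by positivity
    simp [PySem.List.pyGet?, PySem.List.pyIdx?, hpos]
  rw [h0, key, pk, PySem.List.slice_to_neg_one, List.dropLast_concat, replaceRuns]
  rw [show 1 + (u.takeWhile (· == c)).length = (u.takeWhile (· == c)).length + 1 by omega]
  simp

-- A's per-string work equals B's per-string work
theorem string_eq (s : String) : rarString s
    = PySem.Str.join " "
        (((PySem.Str.split₀ s).reverse).map (fun w => String.ofList (replaceRuns w.toList))) := by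
  unfold rarString
  have hsl : (PySem.List.slice? (PySem.Str.split₀ s) none none (-1)).getD []
      = (PySem.Str.split₀ s).reverse := by simp [pysem]
  rw [hsl]
  simp only [PySem.List.foldl_append_singleton_eq_map, List.nil_append]
  exact congrArg (PySem.Str.join " ")
    (List.map_congr_left (fun w hw =>
      word_eq w (split₀_sound s w (List.mem_reverse.mp hw)).1
        (split₀_sound s w (List.mem_reverse.mp hw)).2))

-- ===== VERDICT (by name: the statement is the Claim_ definition above) =====
theorem reverse_and_replace_spec : Claim_equal_reverse_and_replace := by
  intro arr _
  unfold Spec_reverse_and_replace reverse_and_replace reverse_and_replace_alt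
  rw [PySem.List.foldl_append_singleton_eq_map rarString arr []]
  simp only [List.nil_append]
  exact List.map_congr_left (fun s _ => string_eq s)
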